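-- pv_equiv track=rewrite | github.com/ram-prasad-sahoo/astrava | modules/chain_attacks.py | assess_chain_feasibility
-- ===== SOURCE A (Python) =====
-- from typing import Dict, List, Any, Optional, Tuple
--
-- def assess_chain_feasibility(vulnerabilities: List[Dict[str, Any]]) -> str:
--     """Assess how feasible the attack chain is to execute"""
--
--     # Factors affecting feasibility
--     complexity_factors = 0
--
--     # More vulnerabilities = more complex
--     if len(vulnerabilities) > 3:
--         complexity_factors += 1
--
--     # Check for authentication requirements
--     auth_required = any('auth' in v.get('description', '').lower() for v in vulnerabilities)
--     if auth_required:
--         complexity_factors += 1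
--
--     # Check for user interaction requirements
--     user_interaction = any('xss' in v.get('type', '').lower() for v in vulnerabilities)
--     if user_interaction:
--         complexity_factors += 1
--
--     # Check for timing requirements
--     timing_sensitive = any('time-based' in v.get('type', '').lower() for v in vulnerabilities)
--     if timing_sensitive:
--         complexity_factors += 1
--
--     if complexity_factors == 0:
--         return "High - Simple to execute with basic tools"
--     elif complexity_factors == 1:
--         return "Medium - Requires some technical skill and preparation"
--     elif complexity_factors == 2:
--         return "Low - Requires advanced skills and specific conditions"
--     else:
--         return "Very Low - Highly complex, requires expert knowledge"
-- ===== SOURCE B (Python) =====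
-- from typing import Dict, List, Any
--
-- def assess_chain_feasibility(vulnerabilities: List[Dict[str, Any]]) -> str:
--     """Assess how feasible the attack chain is to execute (single pass)."""
--     auth = xss = timing = False
--     for v in vulnerabilities:
--         desc = v.get('description', '').lower()
--         typ = v.get('type', '').lower()
--         auth = auth or ('auth' in desc)
--         xss = xss or ('xss' in typ)
--         timing = timing or ('time-based' in typ)
--     complexity_factors = int(auth) + int(xss) + int(timing) + int(len(vulnerabilities) > 3)
--     return [
--         "High - Simple to execute with basic tools",
--         "Medium - Requires some technical skill and preparation",
--         "Low - Requires advanced skills and specific conditions",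
--     ][complexity_factors] if complexity_factors < 3 else "Very Low - Highly complex, requires expert knowledge"
-- ===== Notes on version B (the rewrite author's own statement) =====
-- stated objective: simpler
-- what changed: One pass over the vulnerabilities accumulating the three boolean factors (instead of three separate any() scans), then the classification read off a table indexed by the factor count instead of an if/elif ladder.
import Mathlib
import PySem

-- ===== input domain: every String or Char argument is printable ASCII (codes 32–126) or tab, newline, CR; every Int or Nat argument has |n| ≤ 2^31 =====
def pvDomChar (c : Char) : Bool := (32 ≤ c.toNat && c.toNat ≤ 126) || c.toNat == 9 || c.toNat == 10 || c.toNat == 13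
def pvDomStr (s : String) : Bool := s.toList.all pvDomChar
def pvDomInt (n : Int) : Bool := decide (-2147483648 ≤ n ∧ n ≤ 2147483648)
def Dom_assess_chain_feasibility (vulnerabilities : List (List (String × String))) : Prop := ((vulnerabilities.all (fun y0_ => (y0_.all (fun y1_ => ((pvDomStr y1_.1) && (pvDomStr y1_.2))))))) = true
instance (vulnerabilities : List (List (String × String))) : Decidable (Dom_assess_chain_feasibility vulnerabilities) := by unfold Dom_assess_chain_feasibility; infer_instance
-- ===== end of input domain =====

-- B fuses A's three any() scans into one loop with three boolean accumulators and
-- reads the classification off a table; same return value, objective: simpler.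

-- ===== PORT A =====
def assess_chain_feasibility (vulnerabilities : List (List (String × String))) : String :=
  let complexity_factors : Int := 0
  let complexity_factors :=
    if vulnerabilities.length > 3 then complexity_factors + 1 else complexity_factors
  let auth_required :=
    vulnerabilities.any (fun v =>
      PySem.Str.isIn "auth" (PySem.Str.lower ((PySem.Dict.mk v).getD "description" "")))
  let complexity_factors := if auth_required then complexity_factors + 1 else complexity_factors
  let user_interaction :=
    vulnerabilities.any (fun v =>
      PySem.Str.isIn "xss" (PySem.Str.lower ((PySem.Dict.mk v).getD "type" "")))
  let complexity_factors := if user_interaction then complexity_factors + 1 else complexity_factors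
  let timing_sensitive :=
    vulnerabilities.any (fun v =>
      PySem.Str.isIn "time-based" (PySem.Str.lower ((PySem.Dict.mk v).getD "type" "")))
  let complexity_factors := if timing_sensitive then complexity_factors + 1 else complexity_factors
  if complexity_factors = 0 then "High - Simple to execute with basic tools"
  else if complexity_factors = 1 then "Medium - Requires some technical skill and preparation"
  else if complexity_factors = 2 then "Low - Requires advanced skills and specific conditions"
  else "Very Low - Highly complex, requires expert knowledge"

-- ===== PORT B =====
def assess_chain_feasibility_alt (vulnerabilities : List (List (String × String))) : String :=
  let flags :=
    vulnerabilities.foldl (fun (acc : Bool × Bool × Bool) v =>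
      let desc := PySem.Str.lower ((PySem.Dict.mk v).getD "description" "")
      let typ := PySem.Str.lower ((PySem.Dict.mk v).getD "type" "")
      (acc.1 || PySem.Str.isIn "auth" desc,
       acc.2.1 || PySem.Str.isIn "xss" typ,
       acc.2.2 || PySem.Str.isIn "time-based" typ)) (false, false, false)
  let complexity_factors : Int :=
    (if flags.1 then 1 else 0) + (if flags.2.1 then 1 else 0) + (if flags.2.2 then 1 else 0) +
      (if vulnerabilities.length > 3 then 1 else 0)
  if complexity_factors < 3 then
    PySem.List.pyGetD
      ["High - Simple to execute with basic tools",
       "Medium - Requires some technical skill and preparation",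
       "Low - Requires advanced skills and specific conditions"]
      complexity_factors ""
  else "Very Low - Highly complex, requires expert knowledge"

-- ===== PRECONDITION & SPEC =====
def Spec_assess_chain_feasibility (vulnerabilities : List (List (String × String))) (out : String) : Prop := out = assess_chain_feasibility_alt vulnerabilities
instance (vulnerabilities : List (List (String × String))) (out : String) : Decidable (Spec_assess_chain_feasibility vulnerabilities out) := by unfold Spec_assess_chain_feasibility; infer_instance

-- ===== CLAIM (what is proved, stated in full; the proofs are below) =====
def Claim_equal_assess_chain_feasibility : Prop := ∀ (vulnerabilities : List (List (String × String))), Dom_assess_chain_feasibility vulnerabilities → Spec_assess_chain_feasibility vulnerabilities (assess_chain_feasibility vulnerabilities)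

-- ===== LEMMAS AND PROOFS =====

-- B's single fold computes the three any() values componentwise.
theorem pvFold_eq_any (l : List (List (String × String))) (a x t : Bool) :
    l.foldl (fun (acc : Bool × Bool × Bool) v =>
      let desc := PySem.Str.lower ((PySem.Dict.mk v).getD "description" "")
      let typ := PySem.Str.lower ((PySem.Dict.mk v).getD "type" "")
      (acc.1 || PySem.Str.isIn "auth" desc,
       acc.2.1 || PySem.Str.isIn "xss" typ,
       acc.2.2 || PySem.Str.isIn "time-based" typ)) (a, x, t) =
    (a || l.any (fun v => PySem.Str.isIn "auth" (PySem.Str.lower ((PySem.Dict.mk v).getD "description" ""))),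
     x || l.any (fun v => PySem.Str.isIn "xss" (PySem.Str.lower ((PySem.Dict.mk v).getD "type" ""))),
     t || l.any (fun v => PySem.Str.isIn "time-based" (PySem.Str.lower ((PySem.Dict.mk v).getD "type" "")))) := by
  induction l generalizing a x t with
  | nil => simp
  | cons h tl ih => rw [List.foldl_cons, ih]; simp [Bool.or_assoc]

theorem assess_chain_feasibility_spec : Claim_equal_assess_chain_feasibility := by
  intro vs _
  show assess_chain_feasibility vs = assess_chain_feasibility_alt vs
  unfold assess_chain_feasibility assess_chain_feasibility_alt
  rw [pvFold_eq_any]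
  by_cases hl : vs.length > 3 <;>
  cases ha : vs.any (fun v => PySem.Str.isIn "auth" (PySem.Str.lower ((PySem.Dict.mk v).getD "description" ""))) <;>
  cases hx : vs.any (fun v => PySem.Str.isIn "xss" (PySem.Str.lower ((PySem.Dict.mk v).getD "type" ""))) <;>
  cases ht : vs.any (fun v => PySem.Str.isIn "time-based" (PySem.Str.lower ((PySem.Dict.mk v).getD "type" ""))) <;>
  norm_num [hl, PySem.List.pyGetD, PySem.List.pyGet?, PySem.List.pyIdx?] <;> rfl
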